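-- pv_equiv track=rewrite | github.com/Matt740/School | Python Projects ESC180/Project2_Gomoku_Bot.py | detect_rows_horizontal_is_win
-- ===== SOURCE A (Python) =====
-- def is_bounded_start(board, y_end, x_end, length, d_y, d_x): # Helper function for is_bounded
--     '''returns True if the sequence of length length that ends at location (y_end, x_end) is bounded at the end opposite of (y_end, x_end)'''
--     if y_end - length*d_y > 7 or y_end - length*d_y < 0:
--         return True
--     elif x_end - length*d_x > 7 or x_end - length*d_x < 0:
--         return True
--     elif board[y_end - length*d_y][x_end - length*d_x] != ' ':
--         return True
--     return False
--
-- def is_bounded_end(board, y_end, x_end, length, d_y, d_x): # Helper function for is_bounded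
--     '''returns True if the sequence of length length that ends at location (y_end, x_end) is bounded at the end (y_end, x_end)'''
--     if y_end + d_y > 7 or y_end + d_y < 0:
--         return True
--     elif x_end + d_x > 7 or x_end + d_x < 0:
--         return True
--     elif board[y_end + d_y][x_end + d_x] != ' ':
--         return True
--     return False
--
-- def is_bounded(board, y_end, x_end, length, d_y, d_x):
--     '''analyses the sequence of length length that ends at location (y_end, x_end). The function returns "OPEN" if the sequence is open, "SEMIOPEN" if the sequence if semi-open, and "CLOSED" if the sequence is closed.'''
--     if is_bounded_start(board, y_end, x_end, length, d_y, d_x) == True and is_bounded_end(board, y_end, x_end, length, d_y, d_x) == True: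
--         return "CLOSED"
--     elif is_bounded_start(board, y_end, x_end, length, d_y, d_x) == True and is_bounded_end(board, y_end, x_end, length, d_y, d_x) == False:
--         return "SEMIOPEN"
--     elif is_bounded_start(board, y_end, x_end, length, d_y, d_x) == False and is_bounded_end(board, y_end, x_end, length, d_y, d_x) == True:
--         return "SEMIOPEN"
--     elif is_bounded_start(board, y_end, x_end, length, d_y, d_x) == False and is_bounded_end(board, y_end, x_end, length, d_y, d_x) == False:
--         return "OPEN"
--
-- def detect_row_is_win(board, col, y_start, x_start, length, d_y, d_x):
--     open_seq_count = 0
--     semi_open_seq_count = 0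
--     closed_seq_count = 0
--     counter = 0
--     while 0 <= y_start + (length-1)*d_y <= 7 and 0 <= x_start + (length-1)*d_x <= 7:
--         for i in range(length):
--             if board[y_start + i*d_y][x_start + i*d_x] == col:
--                 counter += 1
--         if counter == length:
--             if is_bounded(board, y_start, x_start, length, -d_y, -d_x) == "SEMIOPEN":
--                 semi_open_seq_count += 1
--             elif is_bounded(board, y_start, x_start, length, -d_y, -d_x) == "OPEN":
--                 open_seq_count += 1
--             elif is_bounded(board, y_start, x_start, length, -d_y, -d_x) == "CLOSED":
--                 closed_seq_count += 1
--         y_start += d_y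
--         x_start += d_x
--         counter = 0
--     return open_seq_count, semi_open_seq_count, closed_seq_count
--
-- def detect_rows_horizontal_is_win(board, col, length):
--     open_seq_count = 0
--     semi_open_seq_count = 0
--     closed_seq_count = 0
--     y_horizontal_start = 0
--     res = ()
--     for i in range(1, 9):
--         res += detect_row_is_win(board, col, y_horizontal_start, 0, length, 0, 1)
--         y_horizontal_start = 0
--         y_horizontal_start += i
--     for j in range(1, len(res), 3):
--         semi_open_seq_count += res[j]
--     for k in range(0, len(res), 3):
--         open_seq_count += res[k]
--     for h in range(2, len(res), 3):
--         closed_seq_count += res[h]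
--     return open_seq_count, semi_open_seq_count, closed_seq_count
-- ===== SOURCE B (Python) =====
-- def detect_rows_horizontal_is_win(board, col, length):
--     # one pass per row with a sliding window count; boundary cells checked directly
--     if not (1 <= length <= 8):
--         return (0, 0, 0)
--     opens = 0
--     semis = 0
--     closeds = 0
--     for y in range(8):
--         row = board[y]
--         cnt = 0
--         for x in range(9 - length):
--             if x == 0:
--                 cnt = 0
--                 for i in range(length):
--                     if row[i] == col:
--                         cnt += 1
--             else:
--                 if row[x + length - 1] == col:
--                     cnt += 1
--                 if row[x - 1] == col:
--                     cnt -= 1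
--             if cnt == length:
--                 left_free = x - 1 >= 0 and row[x - 1] == ' '
--                 right_free = x + length <= 7 and row[x + length] == ' '
--                 if left_free and right_free:
--                     opens += 1
--                 elif left_free or right_free:
--                     semis += 1
--                 else:
--                     closeds += 1
--     return (opens, semis, closeds)
-- ===== Notes on version B (the rewrite author's own statement) =====
-- stated objective: simpler
-- what changed: B replaces A's four-function pipeline (per-row while loop re-summing each length-window, tuple concatenation of 8 row triples, then three strided index passes) with a single function that slides an O(1)-updated window count along each of the 8 rows and classifies a full window by directly testing the two boundary cells, incrementing three running counters.
import Mathlib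
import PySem

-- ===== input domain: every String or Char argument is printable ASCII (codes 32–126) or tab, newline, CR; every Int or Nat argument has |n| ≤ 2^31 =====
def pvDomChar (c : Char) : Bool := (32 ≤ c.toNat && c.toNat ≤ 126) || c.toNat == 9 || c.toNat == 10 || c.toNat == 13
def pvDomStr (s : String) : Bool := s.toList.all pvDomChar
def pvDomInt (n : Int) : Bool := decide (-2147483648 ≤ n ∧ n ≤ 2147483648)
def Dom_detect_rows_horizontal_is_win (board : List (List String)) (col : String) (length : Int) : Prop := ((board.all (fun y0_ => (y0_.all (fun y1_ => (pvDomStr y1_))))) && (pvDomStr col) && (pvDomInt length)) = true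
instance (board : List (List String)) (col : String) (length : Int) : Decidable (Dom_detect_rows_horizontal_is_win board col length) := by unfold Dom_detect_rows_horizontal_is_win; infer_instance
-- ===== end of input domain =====

-- B inlines the four-function pipeline into one per-row sliding-window pass (alternative decomposition).


-- ===== PORT A =====
def is_bounded_start (board : List (List String)) (y_end x_end length d_y d_x : Int) : Bool :=
  if y_end - length*d_y > 7 ∨ y_end - length*d_y < 0 then true
  else if x_end - length*d_x > 7 ∨ x_end - length*d_x < 0 then true
  else if PySem.List.pyGetD (PySem.List.pyGetD board (y_end - length*d_y) []) (x_end - length*d_x) "" ≠ " " then true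
  else false

def is_bounded_end (board : List (List String)) (y_end x_end length d_y d_x : Int) : Bool :=
  if y_end + d_y > 7 ∨ y_end + d_y < 0 then true
  else if x_end + d_x > 7 ∨ x_end + d_x < 0 then true
  else if PySem.List.pyGetD (PySem.List.pyGetD board (y_end + d_y) []) (x_end + d_x) "" ≠ " " then true
  else false

def is_bounded (board : List (List String)) (y_end x_end length d_y d_x : Int) : String :=
  if is_bounded_start board y_end x_end length d_y d_x = true ∧ is_bounded_end board y_end x_end length d_y d_x = true then "CLOSED"
  else if is_bounded_start board y_end x_end length d_y d_x = true ∧ is_bounded_end board y_end x_end length d_y d_x = false then "SEMIOPEN"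
  else if is_bounded_start board y_end x_end length d_y d_x = false ∧ is_bounded_end board y_end x_end length d_y d_x = true then "SEMIOPEN"
  else "OPEN"

-- the while loop of detect_row_is_win, transliterated; fuel 9 bounds it at its only
-- call pattern (d_y,d_x) = (0,1), where it runs at most 9-length ≤ 8 iterations
def detect_row_is_win_loop (board : List (List String)) (col : String) (length d_y d_x : Int) :
    Nat → Int → Int → Int → Int → Int → Int × Int × Int
  | 0, _, _, o, s, c => (o, s, c)
  | fuel+1, y_start, x_start, o, s, c =>
    if 0 ≤ y_start + (length-1)*d_y ∧ y_start + (length-1)*d_y ≤ 7 ∧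
       0 ≤ x_start + (length-1)*d_x ∧ x_start + (length-1)*d_x ≤ 7 then
      let counter : Int := (PySem.List.pyRange 0 length 1).foldl
        (fun acc i => if PySem.List.pyGetD (PySem.List.pyGetD board (y_start + i*d_y) []) (x_start + i*d_x) "" = col then acc + 1 else acc) 0
      let r : Int × Int × Int :=
        if counter = length then
          if is_bounded board y_start x_start length (-d_y) (-d_x) = "SEMIOPEN" then (o, s+1, c)
          else if is_bounded board y_start x_start length (-d_y) (-d_x) = "OPEN" then (o+1, s, c)
          else if is_bounded board y_start x_start length (-d_y) (-d_x) = "CLOSED" then (o, s, c+1)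
          else (o, s, c)
        else (o, s, c)
      detect_row_is_win_loop board col length d_y d_x fuel (y_start + d_y) (x_start + d_x) r.1 r.2.1 r.2.2
    else (o, s, c)

def detect_row_is_win (board : List (List String)) (col : String) (y_start x_start length d_y d_x : Int) : Int × Int × Int :=
  detect_row_is_win_loop board col length d_y d_x 9 y_start x_start 0 0 0

def detect_rows_horizontal_is_win (board : List (List String)) (col : String) (length : Int) : Int × Int × Int :=
  let st := (PySem.List.pyRange 1 9 1).foldl
    (fun (st : List Int × Int) i =>
      let t := detect_row_is_win board col st.2 0 length 0 1
      (st.1 ++ [t.1, t.2.1, t.2.2], 0 + i)) ([], 0)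
  let res := st.1
  let semi_open_seq_count := (PySem.List.pyRange 1 (PySem.List.len res) 3).foldl (fun a j => a + PySem.List.pyGetD res j 0) 0
  let open_seq_count := (PySem.List.pyRange 0 (PySem.List.len res) 3).foldl (fun a k => a + PySem.List.pyGetD res k 0) 0
  let closed_seq_count := (PySem.List.pyRange 2 (PySem.List.len res) 3).foldl (fun a h => a + PySem.List.pyGetD res h 0) 0
  (open_seq_count, semi_open_seq_count, closed_seq_count)

-- ===== PORT B =====
def bRowStep (row : List String) (col : String) (length : Int) (q : Int × Int × Int × Int) (x : Int) : Int × Int × Int × Int :=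
  let cnt : Int :=
    if x = 0 then
      (PySem.List.pyRange 0 length 1).foldl (fun a i => if PySem.List.pyGetD row i "" = col then a + 1 else a) 0
    else
      let c1 := if PySem.List.pyGetD row (x + length - 1) "" = col then q.1 + 1 else q.1
      if PySem.List.pyGetD row (x - 1) "" = col then c1 - 1 else c1
  if cnt = length then
    let left_free : Bool := decide (0 ≤ x - 1) && (PySem.List.pyGetD row (x - 1) "" == " ")
    let right_free : Bool := decide (x + length ≤ 7) && (PySem.List.pyGetD row (x + length) "" == " ")
    if left_free && right_free then (cnt, q.2.1 + 1, q.2.2.1, q.2.2.2)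
    else if left_free || right_free then (cnt, q.2.1, q.2.2.1 + 1, q.2.2.2)
    else (cnt, q.2.1, q.2.2.1, q.2.2.2 + 1)
  else (cnt, q.2)

def bRow (board : List (List String)) (col : String) (length : Int) (st : Int × Int × Int) (y : Int) : Int × Int × Int :=
  let row := PySem.List.pyGetD board y []
  ((PySem.List.pyRange 0 (9 - length) 1).foldl (bRowStep row col length) (0, st)).2

def detect_rows_horizontal_is_win_alt (board : List (List String)) (col : String) (length : Int) : Int × Int × Int :=
  if 1 ≤ length ∧ length ≤ 8 then
    (PySem.List.pyRange 0 8 1).foldl (bRow board col length) (0, 0, 0)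
  else (0, 0, 0)

-- ===== PRECONDITION & SPEC =====
-- Pre_ excludes exactly the inputs where A raises IndexError: 1 ≤ length ≤ 8 with a board
-- lacking 8 rows of at least 8 cells each (A reads cells (y,x) for all y,x in 0..7 then).
def Pre_detect_rows_horizontal_is_win (board : List (List String)) (col : String) (length : Int) : Prop :=
  1 ≤ length → length ≤ 8 → (8 ≤ board.length ∧ ∀ row ∈ board.take 8, 8 ≤ row.length)
instance (board : List (List String)) (col : String) (length : Int) : Decidable (Pre_detect_rows_horizontal_is_win board col length) := by unfold Pre_detect_rows_horizontal_is_win; infer_instance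

def pvWitness_detect_rows_horizontal_is_win : List (List String) × String × Int :=
  (List.replicate 8 (List.replicate 8 " "), "b", 3)

def Spec_detect_rows_horizontal_is_win (board : List (List String)) (col : String) (length : Int) (out : Int × Int × Int) : Prop := out = detect_rows_horizontal_is_win_alt board col length
instance (board : List (List String)) (col : String) (length : Int) (out : Int × Int × Int) : Decidable (Spec_detect_rows_horizontal_is_win board col length out) := by unfold Spec_detect_rows_horizontal_is_win; infer_instance

-- ===== CLAIM (what is proved, stated in full; the proofs are below) =====
def Claim_equal_detect_rows_horizontal_is_win : Prop := ∀ (board : List (List String)) (col : String) (length : Int), Dom_detect_rows_horizontal_is_win board col length → Pre_detect_rows_horizontal_is_win board col length → Spec_detect_rows_horizontal_is_win board col length (detect_rows_horizontal_is_win board col length)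

-- ===== LEMMAS AND PROOFS =====

-- window count of cells equal to col in row[x .. x+n-1]
def wsum (row : List String) (col : String) (x : Int) : Nat → Int
  | 0 => 0
  | n+1 => wsum row col x n + (if PySem.List.pyGetD row (x + n) "" = col then 1 else 0)

lemma foldl_range_wsum (row : List String) (col : String) (x : Int) :
    ∀ (n : Nat) (a : Int), (List.range n).foldl (fun (a : Int) (k : Nat) => if PySem.List.pyGetD row (x + (k:Int)) "" = col then a + 1 else a) a = a + wsum row col x n := by
  intro n
  induction n with
  | zero => intro a; simp [wsum]
  | succ n ih =>
    intro a
    rw [List.range_succ, List.foldl_append, ih]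
    simp only [List.foldl]
    by_cases h : PySem.List.pyGetD row (x + (n:Int)) "" = col
    · simp [wsum, h]; ring
    · simp [wsum, h]

lemma counter_eq_wsum (row : List String) (col : String) (x L : Int) (hL : 0 ≤ L) :
    (PySem.List.pyRange 0 L 1).foldl (fun a i => if PySem.List.pyGetD row (x + i) "" = col then a + 1 else a) 0 = wsum row col x L.toNat := by
  rw [PySem.List.pyRange_one, List.foldl_map]
  simp only [sub_zero, zero_add]
  rw [foldl_range_wsum]
  omega

lemma wsum_slide (row : List String) (col : String) (x : Int) (n : Nat) :
    wsum row col (x+1) (n+1) = wsum row col x (n+1)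
      - (if PySem.List.pyGetD row x "" = col then 1 else 0)
      + (if PySem.List.pyGetD row (x + 1 + n) "" = col then 1 else 0) := by
  induction n with
  | zero => simp only [wsum, zero_add, Nat.cast_zero, add_zero]; split <;> split <;> omega
  | succ n ih =>
    have e1 : wsum row col (x+1) (n+1+1) = wsum row col (x+1) (n+1) + (if PySem.List.pyGetD row (x+1+(n+1)) "" = col then 1 else 0) := rfl
    have e2 : wsum row col x (n+1+1) = wsum row col x (n+1) + (if PySem.List.pyGetD row (x+(n+1)) "" = col then 1 else 0) := rfl
    rw [e1, e2, ih]
    have : x + 1 + (n:Int) = x + ((n:Nat)+1:Nat) := by push_cast; ring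
    rw [this]
    push_cast
    ring

lemma bs_eq (board : List (List String)) (y x L : Int) (hy0 : 0 ≤ y) (hy7 : y ≤ 7) (hx : 0 ≤ x) (hL : 1 ≤ L) :
    is_bounded_start board y x L 0 (-1)
      = !(decide (x + L ≤ 7) && (PySem.List.pyGetD (PySem.List.pyGetD board y []) (x + L) "" == " ")) := by
  simp only [is_bounded_start, mul_zero, sub_zero, mul_neg, mul_one, sub_neg_eq_add]
  rw [if_neg (by omega)]
  by_cases h7 : x + L ≤ 7
  · rw [if_neg (by omega)]
    by_cases hc : PySem.List.pyGetD (PySem.List.pyGetD board y []) (x + L) "" = " " <;> simp [hc, h7]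
  · rw [if_pos (by omega)]
    simp [h7]

lemma be_eq (board : List (List String)) (y x L : Int) (hy0 : 0 ≤ y) (hy7 : y ≤ 7) (hx : 0 ≤ x) (hL : 1 ≤ L) (hxL : x + L ≤ 8) :
    is_bounded_end board y x L 0 (-1)
      = !(decide (0 ≤ x - 1) && (PySem.List.pyGetD (PySem.List.pyGetD board y []) (x - 1) "" == " ")) := by
  simp only [is_bounded_end, add_zero]
  rw [if_neg (by omega)]
  by_cases h0 : 0 ≤ x - 1
  · rw [if_neg (by omega)]
    have : x + -1 = x - 1 := by ring
    rw [this]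
    by_cases hc : PySem.List.pyGetD (PySem.List.pyGetD board y []) (x - 1) "" = " " <;> simp [hc] <;> omega
  · rw [if_pos (by omega)]
    simp
    omega

lemma classify (board : List (List String)) (y x L o s c w : Int) (hy0 : 0 ≤ y) (hy7 : y ≤ 7) (hx : 0 ≤ x) (hL : 1 ≤ L) (hxL : x + L ≤ 8) :
    (if (decide (0 ≤ x - 1) && (PySem.List.pyGetD (PySem.List.pyGetD board y []) (x - 1) "" == " "))
        && (decide (x + L ≤ 7) && (PySem.List.pyGetD (PySem.List.pyGetD board y []) (x + L) "" == " ")) then ((w, o+1, s, c) : Int × Int × Int × Int)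
     else if (decide (0 ≤ x - 1) && (PySem.List.pyGetD (PySem.List.pyGetD board y []) (x - 1) "" == " "))
        || (decide (x + L ≤ 7) && (PySem.List.pyGetD (PySem.List.pyGetD board y []) (x + L) "" == " ")) then (w, o, s+1, c)
     else (w, o, s, c+1)) =
    (w, if is_bounded board y x L 0 (-1) = "SEMIOPEN" then (o, s+1, c)
     else if is_bounded board y x L 0 (-1) = "OPEN" then (o+1, s, c)
     else if is_bounded board y x L 0 (-1) = "CLOSED" then (o, s, c+1)
     else (o, s, c)) := by
  rw [is_bounded, bs_eq board y x L hy0 hy7 hx hL, be_eq board y x L hy0 hy7 hx hL hxL]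
  cases hrf : (decide (x + L ≤ 7) && (PySem.List.pyGetD (PySem.List.pyGetD board y []) (x + L) "" == " ")) <;>
  cases hlf : (decide (0 ≤ x - 1) && (PySem.List.pyGetD (PySem.List.pyGetD board y []) (x - 1) "" == " ")) <;>
    simp

lemma loop_eq (board : List (List String)) (col : String) (L y : Int) (hL1 : 1 ≤ L) (hy0 : 0 ≤ y) (hy7 : y ≤ 7) :
    ∀ (fuel : Nat) (x cnt o s c : Int), 0 ≤ x → (9 - L - x).toNat ≤ fuel →
      (1 ≤ x → cnt = wsum (PySem.List.pyGetD board y []) col (x-1) L.toNat) →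
      detect_row_is_win_loop board col L 0 1 fuel y x o s c
        = ((PySem.List.pyRange x (9 - L) 1).foldl (bRowStep (PySem.List.pyGetD board y []) col L) (cnt, o, s, c)).2 := by
  intro fuel
  induction fuel with
  | zero =>
    intro x cnt o s c hx hfu _
    rw [PySem.List.pyRange_one_eq_nil (by omega)]
    simp [detect_row_is_win_loop]
  | succ fuel ih =>
    intro x cnt o s c hx hfu hcnt
    by_cases hcond : x < 9 - L
    · have hx8 : x + L ≤ 8 := by omega
      rw [detect_row_is_win_loop]
      simp only [mul_zero, add_zero, mul_one, neg_zero]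
      rw [if_pos (by refine ⟨by omega, by omega, by omega, by omega⟩)]
      rw [counter_eq_wsum (PySem.List.pyGetD board y []) col x L (by omega)]
      rw [PySem.List.pyRange_one_cons (by omega), List.foldl_cons]
      have hcntv : (if x = 0 then
          (PySem.List.pyRange 0 L 1).foldl (fun a i => if PySem.List.pyGetD (PySem.List.pyGetD board y []) i "" = col then a + 1 else a) 0
        else
          (if PySem.List.pyGetD (PySem.List.pyGetD board y []) (x - 1) "" = col then
             (if PySem.List.pyGetD (PySem.List.pyGetD board y []) (x + L - 1) "" = col then cnt + 1 else cnt) - 1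
           else (if PySem.List.pyGetD (PySem.List.pyGetD board y []) (x + L - 1) "" = col then cnt + 1 else cnt)))
          = wsum (PySem.List.pyGetD board y []) col x L.toNat := by
        by_cases hx0 : x = 0
        · rw [if_pos hx0]
          have h0 := counter_eq_wsum (PySem.List.pyGetD board y []) col 0 L (by omega)
          simp only [zero_add] at h0
          rw [h0, hx0]
        · rw [if_neg hx0]
          have hm : L.toNat = (L.toNat - 1) + 1 := by omega
          have hs := wsum_slide (PySem.List.pyGetD board y []) col (x - 1) (L.toNat - 1)
          have hxx : x - 1 + 1 = x := by ring
          have hcast : ((L.toNat - 1 : Nat) : Int) = L - 1 := by omega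
          rw [hxx, hcast] at hs
          have hxL1 : x + (L - 1) = x + L - 1 := by ring
          rw [hxL1] at hs
          rw [← hm] at hs
          rw [hcnt (by omega), hs]
          split <;> split <;> ring
      have hstep : bRowStep (PySem.List.pyGetD board y []) col L (cnt, o, s, c) x
          = (wsum (PySem.List.pyGetD board y []) col x L.toNat,
             if wsum (PySem.List.pyGetD board y []) col x L.toNat = L then
               if is_bounded board y x L 0 (-1) = "SEMIOPEN" then (o, s+1, c)
               else if is_bounded board y x L 0 (-1) = "OPEN" then (o+1, s, c)
               else if is_bounded board y x L 0 (-1) = "CLOSED" then (o, s, c+1)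
               else (o, s, c)
             else (o, s, c)) := by
        simp only [bRowStep]
        rw [hcntv]
        by_cases hw : wsum (PySem.List.pyGetD board y []) col x L.toNat = L
        · rw [if_pos hw, if_pos hw]
          exact classify board y x L o s c (wsum (PySem.List.pyGetD board y []) col x L.toNat) hy0 hy7 hx hL1 hx8
        · rw [if_neg hw, if_neg hw]
      rw [hstep]
      rw [ih (x+1) (wsum (PySem.List.pyGetD board y []) col x L.toNat) _ _ _ (by omega) (by omega)
          (fun _ => by rw [show x + 1 - 1 = x from by ring])]
    · rw [PySem.List.pyRange_one_eq_nil (by omega)]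
      rw [detect_row_is_win_loop]
      rw [if_neg (by intro h; omega)]
      simp

lemma loop_add (board : List (List String)) (col : String) (L d_y d_x : Int) :
    ∀ (fuel : Nat) (y x o s c : Int),
      detect_row_is_win_loop board col L d_y d_x fuel y x o s c
        = (o + (detect_row_is_win_loop board col L d_y d_x fuel y x 0 0 0).1,
           s + (detect_row_is_win_loop board col L d_y d_x fuel y x 0 0 0).2.1,
           c + (detect_row_is_win_loop board col L d_y d_x fuel y x 0 0 0).2.2) := by
  intro fuel
  induction fuel with
  | zero => intro y x o s c; simp [detect_row_is_win_loop]
  | succ fuel ih =>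
    intro y x o s c
    simp only [detect_row_is_win_loop]
    split_ifs with h h1 h2 h3 h4 <;>
      first
        | (simp; done)
        | (simp
           conv_rhs => rw [ih]
           rw [ih]
           simp [Prod.ext_iff]
           try omega)

lemma mainA (board : List (List String)) (col : String) (L : Int) :
    detect_rows_horizontal_is_win board col L =
      ((detect_row_is_win board col 0 0 L 0 1).1 + (detect_row_is_win board col 1 0 L 0 1).1 + (detect_row_is_win board col 2 0 L 0 1).1 + (detect_row_is_win board col 3 0 L 0 1).1 + (detect_row_is_win board col 4 0 L 0 1).1 + (detect_row_is_win board col 5 0 L 0 1).1 + (detect_row_is_win board col 6 0 L 0 1).1 + (detect_row_is_win board col 7 0 L 0 1).1 ,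
       (detect_row_is_win board col 0 0 L 0 1).2.1 + (detect_row_is_win board col 1 0 L 0 1).2.1 + (detect_row_is_win board col 2 0 L 0 1).2.1 + (detect_row_is_win board col 3 0 L 0 1).2.1 + (detect_row_is_win board col 4 0 L 0 1).2.1 + (detect_row_is_win board col 5 0 L 0 1).2.1 + (detect_row_is_win board col 6 0 L 0 1).2.1 + (detect_row_is_win board col 7 0 L 0 1).2.1 ,
       (detect_row_is_win board col 0 0 L 0 1).2.2 + (detect_row_is_win board col 1 0 L 0 1).2.2 + (detect_row_is_win board col 2 0 L 0 1).2.2 + (detect_row_is_win board col 3 0 L 0 1).2.2 + (detect_row_is_win board col 4 0 L 0 1).2.2 + (detect_row_is_win board col 5 0 L 0 1).2.2 + (detect_row_is_win board col 6 0 L 0 1).2.2 + (detect_row_is_win board col 7 0 L 0 1).2.2 ) := by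
  rw [detect_rows_horizontal_is_win]
  rw [show PySem.List.pyRange 1 9 1 = [1,2,3,4,5,6,7,8] from by decide]
  simp only [List.foldl, zero_add]
  generalize detect_row_is_win board col 0 0 L 0 1 = t0 at *
  obtain ⟨a0,b0,c0⟩ := t0
  generalize detect_row_is_win board col 1 0 L 0 1 = t1 at *
  obtain ⟨a1,b1,c1⟩ := t1
  generalize detect_row_is_win board col 2 0 L 0 1 = t2 at *
  obtain ⟨a2,b2,c2⟩ := t2
  generalize detect_row_is_win board col 3 0 L 0 1 = t3 at *
  obtain ⟨a3,b3,c3⟩ := t3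
  generalize detect_row_is_win board col 4 0 L 0 1 = t4 at *
  obtain ⟨a4,b4,c4⟩ := t4
  generalize detect_row_is_win board col 5 0 L 0 1 = t5 at *
  obtain ⟨a5,b5,c5⟩ := t5
  generalize detect_row_is_win board col 6 0 L 0 1 = t6 at *
  obtain ⟨a6,b6,c6⟩ := t6
  generalize detect_row_is_win board col 7 0 L 0 1 = t7 at *
  obtain ⟨a7,b7,c7⟩ := t7
  simp only [List.nil_append, List.cons_append]
  rw [PySem.List.len_eq]
  norm_num
  rw [show PySem.List.pyRange 0 24 3 = [0,3,6,9,12,15,18,21] from by decide,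
      show PySem.List.pyRange 1 24 3 = [1,4,7,10,13,16,19,22] from by decide,
      show PySem.List.pyRange 2 24 3 = [2,5,8,11,14,17,20,23] from by decide]
  simp only [List.foldl, PySem.List.pyGetD_ofNat']
  refine ⟨by simp [List.getD], by simp [List.getD], by simp [List.getD]⟩

lemma row_trivial (board : List (List String)) (col : String) (L y : Int) (h : L < 1 ∨ 8 < L) :
    detect_row_is_win board col y 0 L 0 1 = (0, 0, 0) := by
  rw [detect_row_is_win, detect_row_is_win_loop, if_neg]
  intro hc
  obtain ⟨_, _, h3, h4⟩ := hc
  simp only [mul_one] at h3 h4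
  omega

lemma bRow_eq (board : List (List String)) (col : String) (L y : Int) (hL1 : 1 ≤ L)
    (hy0 : 0 ≤ y) (hy7 : y ≤ 7) (st : Int × Int × Int) :
    bRow board col L st y = detect_row_is_win_loop board col L 0 1 9 y 0 st.1 st.2.1 st.2.2 := by
  rw [bRow, loop_eq board col L y hL1 hy0 hy7 9 0 0 st.1 st.2.1 st.2.2 (le_refl 0) (by omega)
      (fun h => absurd h (by omega))]

lemma bRow_add (board : List (List String)) (col : String) (L y : Int) (hL1 : 1 ≤ L)
    (hy0 : 0 ≤ y) (hy7 : y ≤ 7) (st : Int × Int × Int) :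
    bRow board col L st y = (st.1 + (detect_row_is_win board col y 0 L 0 1).1,
                             st.2.1 + (detect_row_is_win board col y 0 L 0 1).2.1,
                             st.2.2 + (detect_row_is_win board col y 0 L 0 1).2.2) := by
  rw [bRow_eq board col L y hL1 hy0 hy7 st, loop_add, detect_row_is_win]

lemma ab_eq : ∀ (board : List (List String)) (col : String) (L : Int),
    detect_rows_horizontal_is_win board col L = detect_rows_horizontal_is_win_alt board col L := by
  intro board col L
  rw [mainA, detect_rows_horizontal_is_win_alt]
  by_cases hL : 1 ≤ L ∧ L ≤ 8
  · rw [if_pos hL]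
    rw [show PySem.List.pyRange 0 8 1 = [0,1,2,3,4,5,6,7] from by decide]
    simp only [List.foldl]
    rw [bRow_add board col L 0 hL.1 (by norm_num) (by norm_num),
        bRow_add board col L 1 hL.1 (by norm_num) (by norm_num),
        bRow_add board col L 2 hL.1 (by norm_num) (by norm_num),
        bRow_add board col L 3 hL.1 (by norm_num) (by norm_num),
        bRow_add board col L 4 hL.1 (by norm_num) (by norm_num),
        bRow_add board col L 5 hL.1 (by norm_num) (by norm_num),
        bRow_add board col L 6 hL.1 (by norm_num) (by norm_num),
        bRow_add board col L 7 hL.1 (by norm_num) (by norm_num)]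
    simp only [Prod.ext_iff]
    refine ⟨by ring, by ring, by ring⟩
  · rw [if_neg hL]
    have ht : ∀ y : Int, detect_row_is_win board col y 0 L 0 1 = (0, 0, 0) :=
      fun y => row_trivial board col L y (by omega)
    simp [ht]

-- ===== VERDICT (by name: the statement is the Claim_ definition above) =====
theorem detect_rows_horizontal_is_win_spec : Claim_equal_detect_rows_horizontal_is_win := by
  intro board col length _ _
  unfold Spec_detect_rows_horizontal_is_win
  exact ab_eq board col length
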